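-- pv_equiv track=rewrite | github.com/MichalZaorski/ekstra-streak-telegram | ekstra_streak_bot.py | apply_new_matches_to_streak
-- ===== SOURCE A (Python) =====
-- def apply_new_matches_to_streak(streak: int, new_matches: list[dict]) -> tuple[int, dict | None]:
--     last = None
--     for m in new_matches:
--         if m["home_goals"] == m["away_goals"]:
--             streak = 0
--             last = None
--         else:
--             streak += 1
--             last = m
--     return streak, last
-- ===== SOURCE B (Python) =====
-- def apply_new_matches_to_streak(streak: int, new_matches: list[dict]) -> tuple[int, dict | None]:
--     # Scan from the end: count non-draws until the first draw (which wiped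
--     # everything before it); the forward-last match is the first one seen here.
--     count = 0
--     last = None
--     for m in reversed(new_matches):
--         if m["home_goals"] == m["away_goals"]:
--             return count, last
--         if count == 0:
--             last = m
--         count += 1
--     return streak + count, last
-- ===== Notes on version B (the rewrite author's own statement) =====
-- stated objective: alternative
-- what changed: B scans the matches backwards with an early return at the first draw (which reset the streak), counting only the suffix of non-draws and adding the incoming streak only when no draw exists, instead of A's forward fold that resets the accumulator on every draw.
import Mathlib
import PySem

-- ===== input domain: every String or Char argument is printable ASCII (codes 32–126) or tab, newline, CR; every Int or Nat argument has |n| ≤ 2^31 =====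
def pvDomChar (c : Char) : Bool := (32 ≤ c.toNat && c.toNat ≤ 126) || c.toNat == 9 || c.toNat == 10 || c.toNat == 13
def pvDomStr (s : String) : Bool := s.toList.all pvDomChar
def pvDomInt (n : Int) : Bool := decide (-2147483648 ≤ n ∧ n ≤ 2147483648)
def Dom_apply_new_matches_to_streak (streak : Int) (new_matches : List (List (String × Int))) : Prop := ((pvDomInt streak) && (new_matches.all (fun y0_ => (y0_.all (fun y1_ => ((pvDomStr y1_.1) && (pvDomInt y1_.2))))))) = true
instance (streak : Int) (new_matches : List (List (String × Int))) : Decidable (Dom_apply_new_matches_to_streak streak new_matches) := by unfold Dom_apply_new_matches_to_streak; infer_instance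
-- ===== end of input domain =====

-- B scans the matches backwards with an early return at the first draw; return-value equivalence with A proved on Pre_ (all match dicts carry both goal keys).

-- ===== PORT A =====
-- forward fold over the matches, state = (streak, last), reset on draw
def apply_new_matches_to_streak (streak : Int) (new_matches : List (List (String × Int))) : Int × (Option (List (String × Int))) :=
  new_matches.foldl
    (fun st m =>
      if PySem.Dict.getD (PySem.Dict.mk m) "home_goals" (0 : Int) = PySem.Dict.getD (PySem.Dict.mk m) "away_goals" (0 : Int) then
        ((0 : Int), none)
      else
        (st.1 + 1, some m))
    (streak, none)

-- ===== PORT B =====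
-- backward scan: count the non-draw suffix, stop at the first draw seen from the end
def pvAltGo (count : Int) (last : Option (List (String × Int))) (streak : Int) :
    List (List (String × Int)) → Int × (Option (List (String × Int)))
  | [] => (streak + count, last)
  | m :: rest =>
    if PySem.Dict.getD (PySem.Dict.mk m) "home_goals" (0 : Int) = PySem.Dict.getD (PySem.Dict.mk m) "away_goals" (0 : Int) then
      (count, last)
    else
      pvAltGo (count + 1) (if count = 0 then some m else last) streak rest

def apply_new_matches_to_streak_alt (streak : Int) (new_matches : List (List (String × Int))) : Int × (Option (List (String × Int))) :=
  pvAltGo 0 none streak new_matches.reverse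

-- ===== PRECONDITION & SPEC =====
-- Pre_ excludes exactly the inputs where Python A raises KeyError: a match dict missing "home_goals" or "away_goals".
def Pre_apply_new_matches_to_streak (streak : Int) (new_matches : List (List (String × Int))) : Prop :=
  ∀ m ∈ new_matches, (PySem.Dict.get? (PySem.Dict.mk m) "home_goals").isSome ∧ (PySem.Dict.get? (PySem.Dict.mk m) "away_goals").isSome
instance (streak : Int) (new_matches : List (List (String × Int))) : Decidable (Pre_apply_new_matches_to_streak streak new_matches) := by unfold Pre_apply_new_matches_to_streak; infer_instance

def pvWitness_apply_new_matches_to_streak : Int × (List (List (String × Int))) :=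
  (2, [[("home_goals", 1), ("away_goals", 2)], [("home_goals", 0), ("away_goals", 0)]])

def Spec_apply_new_matches_to_streak (streak : Int) (new_matches : List (List (String × Int))) (out : Int × (Option (List (String × Int)))) : Prop := out = apply_new_matches_to_streak_alt streak new_matches
instance (streak : Int) (new_matches : List (List (String × Int))) (out : Int × (Option (List (String × Int)))) : Decidable (Spec_apply_new_matches_to_streak streak new_matches out) := by unfold Spec_apply_new_matches_to_streak; infer_instance

-- ===== CLAIM (what is proved, stated in full; the proofs are below) =====
def Claim_equal_apply_new_matches_to_streak : Prop := ∀ (streak : Int) (new_matches : List (List (String × Int))), Dom_apply_new_matches_to_streak streak new_matches → Pre_apply_new_matches_to_streak streak new_matches → Spec_apply_new_matches_to_streak streak new_matches (apply_new_matches_to_streak streak new_matches)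

-- ===== LEMMAS AND PROOFS =====

-- A's fold step, named for the lemmas below
def pvStepA (st : Int × Option (List (String × Int))) (m : List (String × Int)) : Int × Option (List (String × Int)) :=
  if PySem.Dict.getD (PySem.Dict.mk m) "home_goals" (0 : Int) = PySem.Dict.getD (PySem.Dict.mk m) "away_goals" (0 : Int) then
    ((0 : Int), none)
  else
    (st.1 + 1, some m)

theorem pvA_eq_fold (streak : Int) (l : List (List (String × Int))) :
    apply_new_matches_to_streak streak l = l.foldl pvStepA (streak, none) := rfl

-- With count ≥ 1, the backward scan never rewrites `last` and adds exactly A's streak value.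
theorem pvAltGo_pos (l : List (List (String × Int))) :
    ∀ (c : Int) (la : Option (List (String × Int))) (s : Int), 1 ≤ c →
      pvAltGo c la s l.reverse = ((l.foldl pvStepA (s, none)).1 + c, la) := by
  induction l using List.reverseRecOn with
  | nil => intro c la s _; simp [pvAltGo]
  | append_singleton l m ih =>
    intro c la s hc
    rw [List.reverse_append]
    simp only [List.reverse_cons, List.reverse_nil, List.nil_append, List.singleton_append,
      List.foldl_append, List.foldl_cons, List.foldl_nil]
    by_cases hd : PySem.Dict.getD (PySem.Dict.mk m) "home_goals" (0 : Int) = PySem.Dict.getD (PySem.Dict.mk m) "away_goals" (0 : Int)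
    · simp [pvAltGo, pvStepA, hd]
    · rw [pvAltGo]
      rw [if_neg hd, if_neg (by omega : ¬ c = 0)]
      rw [ih (c + 1) la s (by omega)]
      simp [pvStepA, hd]
      ring

theorem pvMain (streak : Int) (l : List (List (String × Int))) :
    apply_new_matches_to_streak streak l = apply_new_matches_to_streak_alt streak l := by
  rw [pvA_eq_fold]
  unfold apply_new_matches_to_streak_alt
  induction l using List.reverseRecOn with
  | nil => simp [pvAltGo]
  | append_singleton l m _ =>
    rw [List.reverse_append]
    simp only [List.reverse_cons, List.reverse_nil, List.nil_append, List.singleton_append,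
      List.foldl_append, List.foldl_cons, List.foldl_nil]
    by_cases hd : PySem.Dict.getD (PySem.Dict.mk m) "home_goals" (0 : Int) = PySem.Dict.getD (PySem.Dict.mk m) "away_goals" (0 : Int)
    · simp [pvAltGo, pvStepA, hd]
    · rw [pvAltGo]
      rw [if_neg hd, if_pos rfl]
      rw [show (0:Int) + 1 = 1 from rfl, pvAltGo_pos l 1 (some m) streak (by omega)]
      simp [pvStepA, hd]

-- ===== VERDICT (by name: the statement is the Claim_ definition above) =====
theorem apply_new_matches_to_streak_spec : Claim_equal_apply_new_matches_to_streak := by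
  intro streak new_matches _ _
  unfold Spec_apply_new_matches_to_streak
  exact pvMain streak new_matches
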